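-- pv_equiv track=rewrite | github.com/edomonndo/python-library | test/unit_test/typical_problems_of_sum.test.py | greedy4
-- ===== SOURCE A (Python) =====
-- def greedy4(A):
--     n = len(A)
--     res = 0
--     for i in range(n):
--         for j in range(i + 1, n):
--             for k in range(j + 1, n):
--                 res += min(A[i], A[j], A[k])
--     return res
-- ===== SOURCE B (Python) =====
-- def greedy4(A):
--     # sort ascending; scanning from the largest down, the current element is the
--     # minimum of every triple it forms with two already-seen (larger) elements.
--     s = sorted(A)
--     res = 0
--     pairs = 0  # number of pairs among the elements already seen
--     seen = 0
--     for x in reversed(s):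
--         res += x * pairs
--         pairs += seen
--         seen += 1
--     return res
-- ===== Notes on version B (the rewrite author's own statement) =====
-- stated objective: faster
-- what changed: Replaces the O(n^3) triple loop by sorting and a single pass: each element, scanned from largest to smallest, is the minimum of exactly C(seen,2) triples, counted incrementally without any division or binomial call.
import Mathlib
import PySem

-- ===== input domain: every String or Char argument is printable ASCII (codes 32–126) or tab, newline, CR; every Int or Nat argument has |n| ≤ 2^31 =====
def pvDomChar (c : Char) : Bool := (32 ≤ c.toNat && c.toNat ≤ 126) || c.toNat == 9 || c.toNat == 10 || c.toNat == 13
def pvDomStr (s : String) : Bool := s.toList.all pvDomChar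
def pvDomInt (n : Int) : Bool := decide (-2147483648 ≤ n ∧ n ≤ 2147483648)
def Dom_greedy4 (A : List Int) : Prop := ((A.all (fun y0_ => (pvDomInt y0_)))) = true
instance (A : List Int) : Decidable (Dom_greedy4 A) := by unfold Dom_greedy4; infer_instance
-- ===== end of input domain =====

-- B replaces A's O(n^3) triple loop by a sort and one pass counting, for each element
-- taken largest-to-smallest, the pairs of larger elements it completes a triple with (objective: faster).

-- ===== PORT A =====
def greedy4 (A : List Int) : Int :=
  let n : Int := (A.length : Int)
  (PySem.List.pyRange 0 n 1).foldl (fun res i =>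
    (PySem.List.pyRange (i + 1) n 1).foldl (fun res j =>
      (PySem.List.pyRange (j + 1) n 1).foldl (fun res k =>
        res + min (min (PySem.List.pyGetD A i 0) (PySem.List.pyGetD A j 0)) (PySem.List.pyGetD A k 0))
        res)
      res)
    0

-- ===== PORT B =====
def greedy4_alt (A : List Int) : Int :=
  let s := PySem.List.sorted A (fun x => x) false
  let st := s.reverse.foldl
    (fun st x => (st.1 + x * st.2.1, st.2.1 + st.2.2, st.2.2 + 1))
    ((0 : Int), (0 : Int), (0 : Int))
  st.1

-- ===== PRECONDITION & SPEC =====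
def Spec_greedy4 (A : List Int) (out : Int) : Prop := out = greedy4_alt A
instance (A : List Int) (out : Int) : Decidable (Spec_greedy4 A out) := by unfold Spec_greedy4; infer_instance

-- ===== CLAIM (what is proved, stated in full; the proofs are below) =====
def Claim_equal_greedy4 : Prop := ∀ (A : List Int), Dom_greedy4 A → Spec_greedy4 A (greedy4 A)

-- ===== LEMMAS AND PROOFS =====

-- T1 c l = sum of min c y over y in l; T2 c l = sum of min(c, pair) over pairs of l;
-- T3 l = sum of min over index triples of l (the mathematical content of A's loops).
def T1 (c : Int) : List Int → Int
  | [] => 0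
  | x :: xs => min c x + T1 c xs

def T2 (c : Int) : List Int → Int
  | [] => 0
  | x :: xs => T1 (min c x) xs + T2 c xs

def T3 : List Int → Int
  | [] => 0
  | x :: xs => T2 x xs + T3 xs

-- B's loop, as a named fold, and its result from the empty state
def Gfold (l : List Int) (st : Int × Int × Int) : Int × Int × Int :=
  l.foldl (fun st x => (st.1 + x * st.2.1, st.2.1 + st.2.2, st.2.2 + 1)) st

def G (l : List Int) : Int := (Gfold l.reverse (0, 0, 0)).1

theorem Gfold_pt (l : List Int) : ∀ (r p t : Int),
    (Gfold l (r, p, t)).2.1 = p + t * l.length + (l.length.choose 2 : Int) ∧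
    (Gfold l (r, p, t)).2.2 = t + l.length := by
  induction l with
  | nil => intro r p t; simp [Gfold]
  | cons x xs ih =>
    intro r p t
    have h := ih (r + x * p) (p + t) (t + 1)
    have hc : ((xs.length + 1).choose 2 : Int) = (xs.length.choose 2 : Int) + xs.length := by
      rw [Nat.choose_succ_succ]
      push_cast [Nat.choose_one_right]
      ring
    constructor
    · show (Gfold xs _).2.1 = _
      rw [h.1]; simp; push_cast [hc]; ring
    · show (Gfold xs _).2.2 = _
      rw [h.2]; simp; ring

theorem G_cons (x : Int) (xs : List Int) :
    G (x :: xs) = G xs + x * (xs.length.choose 2 : Int) := by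
  unfold G Gfold
  rw [List.reverse_cons, List.foldl_append]
  have h := Gfold_pt xs.reverse 0 0 0
  simp only [Gfold, List.length_reverse] at h
  simp only [List.foldl_cons, List.foldl_nil]
  rw [h.1]; ring

theorem T1_eq_sum (c : Int) (l : List Int) :
    T1 c l = (l.map (fun y => min c y)).sum := by
  induction l with
  | nil => rfl
  | cons x xs ih => simp [T1, ih]

theorem T1_perm (c : Int) {l l' : List Int} (h : l.Perm l') : T1 c l = T1 c l' := by
  rw [T1_eq_sum, T1_eq_sum]
  exact (h.map _).sum_eq

theorem T2_perm (c : Int) {l l' : List Int} (h : l.Perm l') : T2 c l = T2 c l' := by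
  induction h generalizing c with
  | nil => rfl
  | cons x h ih => simp [T2, T1_perm _ h, ih]
  | swap x y l =>
    simp only [T2, T1]
    rw [min_right_comm]
    ring
  | trans h1 h2 ih1 ih2 => exact (ih1 c).trans (ih2 c)

theorem T3_perm {l l' : List Int} (h : l.Perm l') : T3 l = T3 l' := by
  induction h with
  | nil => rfl
  | cons x h ih => simp [T3, T2_perm _ h, ih]
  | swap x y l =>
    simp only [T3, T2]
    rw [min_comm y x]
    ring
  | trans h1 h2 ih1 ih2 => exact ih1.trans ih2

theorem T1_const (c : Int) (l : List Int) (h : ∀ y ∈ l, c ≤ y) :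
    T1 c l = c * l.length := by
  induction l with
  | nil => simp [T1]
  | cons x xs ih =>
    simp only [T1, min_eq_left (h x (by simp))]
    rw [ih (fun y hy => h y (by simp [hy]))]
    simp only [List.length_cons]
    push_cast; ring

theorem T2_const (c : Int) (l : List Int) (h : ∀ y ∈ l, c ≤ y) :
    T2 c l = c * (l.length.choose 2 : Int) := by
  induction l with
  | nil => simp [T2]
  | cons x xs ih =>
    simp only [T2, min_eq_left (h x (by simp))]
    rw [T1_const c xs (fun y hy => h y (by simp [hy])),
        ih (fun y hy => h y (by simp [hy]))]
    have hc : ((xs.length + 1).choose 2 : Int) = (xs.length.choose 2 : Int) + xs.length := by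
      rw [Nat.choose_succ_succ]
      push_cast [Nat.choose_one_right]
      ring
    simp only [List.length_cons]
    push_cast [hc]; ring

theorem T3_sorted (s : List Int) (h : s.Pairwise (· ≤ ·)) : T3 s = G s := by
  induction s with
  | nil => rfl
  | cons x xs ih =>
    rw [List.pairwise_cons] at h
    simp only [T3, T2_const x xs h.1, ih h.2, G_cons]
    ring

-- innermost loop of A = T1 over the suffix
theorem L1 (A : List Int) (c r0 a : Int) (ha : 0 ≤ a) :
    (PySem.List.pyRange a (A.length : Int) 1).foldl
      (fun r k => r + min c (PySem.List.pyGetD A k 0)) r0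
    = r0 + T1 c (A.drop a.toNat) := by
  rw [PySem.List.foldl_pyRange_pyGetD' A 0 (fun r v => r + min c v) r0 ha]
  rw [PySem.List.foldl_add (g := fun v => min c v)]
  rw [T1_eq_sum]

-- middle two loops of A = T2 over the suffix
theorem L2 (A : List Int) (c : Int) : ∀ (m j : Nat) (r0 : Int), j + m = A.length →
    (PySem.List.pyRange (j : Int) (A.length : Int) 1).foldl
      (fun r j' => (PySem.List.pyRange (j' + 1) (A.length : Int) 1).foldl
        (fun r2 k => r2 + min (min c (PySem.List.pyGetD A j' 0)) (PySem.List.pyGetD A k 0)) r) r0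
    = r0 + T2 c (A.drop j) := by
  intro m
  induction m with
  | zero =>
    intro j r0 hj
    rw [PySem.List.pyRange_one_eq_nil (by omega : (A.length : Int) ≤ (j : Int))]
    have hd : List.drop j A = [] := by
      rw [show j = A.length from by omega]; exact List.drop_length
    simp [hd, T2]
  | succ m ih =>
    intro j r0 hj
    have hjlt : j < A.length := by omega
    rw [PySem.List.pyRange_one_cons (by exact_mod_cast hjlt)]
    rw [List.foldl_cons]
    have hcast : ((j : Int) + 1) = ((j + 1 : Nat) : Int) := by push_cast; ring
    rw [hcast, L1 A _ r0 _ (by positivity)]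
    rw [ih (j + 1) _ (by omega)]
    have hdrop : A.drop j = A[j] :: A.drop (j + 1) := List.drop_eq_getElem_cons hjlt
    rw [hdrop]
    simp only [T2, Int.toNat_natCast]
    have hget : PySem.List.pyGetD A (j : Int) 0 = A[j] := by
      rw [PySem.List.pyGetD_natCast]
      exact List.getD_eq_getElem A 0 hjlt
    rw [hget]
    ring

-- all three loops of A = T3 over the suffix
theorem L3 (A : List Int) : ∀ (m i : Nat) (r0 : Int), i + m = A.length →
    (PySem.List.pyRange (i : Int) (A.length : Int) 1).foldl
      (fun r i' => (PySem.List.pyRange (i' + 1) (A.length : Int) 1).foldl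
        (fun r2 j => (PySem.List.pyRange (j + 1) (A.length : Int) 1).foldl
          (fun r3 k => r3 + min (min (PySem.List.pyGetD A i' 0) (PySem.List.pyGetD A j 0)) (PySem.List.pyGetD A k 0)) r2) r) r0
    = r0 + T3 (A.drop i) := by
  intro m
  induction m with
  | zero =>
    intro i r0 hi
    rw [PySem.List.pyRange_one_eq_nil (by omega : (A.length : Int) ≤ (i : Int))]
    have hd : List.drop i A = [] := by
      rw [show i = A.length from by omega]; exact List.drop_length
    simp [hd, T3]
  | succ m ih =>
    intro i r0 hi
    have hilt : i < A.length := by omega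
    rw [PySem.List.pyRange_one_cons (by exact_mod_cast hilt)]
    rw [List.foldl_cons]
    have hcast : ((i : Int) + 1) = ((i + 1 : Nat) : Int) := by push_cast; ring
    rw [hcast, L2 A _ m (i + 1) r0 (by omega)]
    rw [ih (i + 1) _ (by omega)]
    have hdrop : A.drop i = A[i] :: A.drop (i + 1) := List.drop_eq_getElem_cons hilt
    rw [hdrop]
    simp only [T3]
    have hget : PySem.List.pyGetD A (i : Int) 0 = A[i] := by
      rw [PySem.List.pyGetD_natCast]
      exact List.getD_eq_getElem A 0 hilt
    rw [hget]
    ring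

theorem greedy4_eq_T3 (A : List Int) : greedy4 A = T3 A := by
  unfold greedy4
  have h := L3 A A.length 0 0 (by omega)
  simpa using h

theorem greedy4_alt_eq_G (A : List Int) :
    greedy4_alt A = G (PySem.List.sorted A (fun x => x) false) := rfl

-- ===== VERDICT (by name: the statement is the Claim_ definition above) =====
theorem greedy4_spec : Claim_equal_greedy4 := by
  intro A _
  unfold Spec_greedy4
  rw [greedy4_eq_T3, greedy4_alt_eq_G,
      T3_perm (PySem.List.sorted_perm A (fun x => x) false).symm,
      T3_sorted _ (PySem.List.sorted_pairwise A (fun x => x))]
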